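-- pv_equiv track=rewrite | github.com/google-research/google-research | simpdom/model_util.py | split_xpath
-- ===== SOURCE A (Python) =====
-- def split_xpath(xpath):
--   """Gets the leaf type from the xpath."""
--   split_tags = []
--   for tag in xpath.split("/"):
--     if tag.find("[") >= 0:
--       tag = tag[:tag.find("[")]
--     if tag.strip():
--       split_tags.append(tag.strip())
--   return split_tags
-- ===== SOURCE B (Python) =====
-- def split_xpath(xpath):
--   """Gets the leaf type from the xpath (single left-to-right character scan)."""
--   tags = []
--   cur = []
--   skipping = False
--   for ch in xpath:
--     if ch == "/":
--       t = "".join(cur).strip()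
--       if t:
--         tags.append(t)
--       cur = []
--       skipping = False
--     elif skipping:
--       continue
--     elif ch == "[":
--       skipping = True
--     else:
--       cur.append(ch)
--   t = "".join(cur).strip()
--   if t:
--     tags.append(t)
--   return tags
-- ===== Notes on version B (the rewrite author's own statement) =====
-- stated objective: alternative
-- what changed: Replaced the split-on-slash + find-bracket + slice + strip pipeline with a single left-to-right character scan that accumulates the current segment, starts skipping once a bracket opens, and flushes a stripped tag at each separator and at the end.
import Mathlib
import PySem

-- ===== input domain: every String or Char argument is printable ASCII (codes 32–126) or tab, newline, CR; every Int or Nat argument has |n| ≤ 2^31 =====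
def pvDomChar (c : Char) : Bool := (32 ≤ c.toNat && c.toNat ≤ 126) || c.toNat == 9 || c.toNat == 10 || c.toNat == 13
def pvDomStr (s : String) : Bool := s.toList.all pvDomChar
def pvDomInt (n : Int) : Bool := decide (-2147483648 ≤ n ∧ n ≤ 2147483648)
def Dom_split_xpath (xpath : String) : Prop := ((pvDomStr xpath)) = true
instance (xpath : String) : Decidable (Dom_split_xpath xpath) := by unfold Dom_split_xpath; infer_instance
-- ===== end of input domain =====

-- B replaces A's split/find/slice/strip pipeline by a single character scan; objective: alternative (same complexity).

-- ===== PORT A =====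
-- literal transliteration of A: split on "/", truncate each tag at '[', strip, keep non-empty
def split_xpath (xpath : String) : List String :=
  (List.foldl (fun acc tag =>
      let tag := if PySem.Chars.find tag ['['] ≥ 0
                 then PySem.Chars.slice tag none (some (PySem.Chars.find tag ['[']))
                 else tag
      if !(PySem.Chars.strip tag).isEmpty then acc ++ [PySem.Chars.strip tag] else acc)
    [] (PySem.Chars.splitOn xpath.toList ['/'])).map String.ofList

-- ===== PORT B =====
-- flush the current (pre-'[') segment: its stripped value, if non-empty
def pvFlush (cur : List Char) : List (List Char) :=
  let t := PySem.Chars.strip cur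
  if t.isEmpty then [] else [t]

-- one step of B's character scan: state = (emitted tags, current segment chars, skipping-after-'[' flag)
def pvStep (st : List (List Char) × List Char × Bool) (c : Char) :
    List (List Char) × List Char × Bool :=
  if c = '/' then (st.1 ++ pvFlush st.2.1, [], false)
  else if st.2.2 then st
  else if c = '[' then (st.1, st.2.1, true)
  else (st.1, st.2.1 ++ [c], false)

def split_xpath_alt (xpath : String) : List String :=
  let st := List.foldl pvStep ([], [], false) xpath.toList
  (st.1 ++ pvFlush st.2.1).map String.ofList

-- ===== PRECONDITION & SPEC =====
def Spec_split_xpath (xpath : String) (out : List String) : Prop := out = split_xpath_alt xpath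
instance (xpath : String) (out : List String) : Decidable (Spec_split_xpath xpath out) := by unfold Spec_split_xpath; infer_instance

-- ===== CLAIM (what is proved, stated in full; the proofs are below) =====
def Claim_equal_split_xpath : Prop := ∀ (xpath : String), Dom_split_xpath xpath → Spec_split_xpath xpath (split_xpath xpath)

-- ===== LEMMAS AND PROOFS =====

-- recursive characterisation of splitting on '/'
def pvSegs : List Char → List (List Char)
  | [] => [[]]
  | c :: cs => if c = '/' then [] :: pvSegs cs else (pvSegs cs).modifyHead (c :: ·)

-- what A does to one segment, stated structurally
def pvClean (seg : List Char) : List Char :=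
  PySem.Chars.strip (seg.takeWhile (fun x => !decide (x = '[')))

def pvOut (segs : List (List Char)) : List (List Char) :=
  (segs.filter (fun s => !(pvClean s).isEmpty)).map pvClean

-- what B's scan from state (cur, sk) emits on the remaining input
def pvE (cur : List Char) (sk : Bool) : List Char → List (List Char)
  | [] => pvFlush cur
  | c :: cs =>
    if c = '/' then pvFlush cur ++ pvE [] false cs
    else if sk then pvE cur true cs
    else if c = '[' then pvE cur true cs
    else pvE (cur ++ [c]) false cs

theorem pvSegs_ne_nil (cs : List Char) : pvSegs cs ≠ [] := by
  cases cs with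
  | nil => simp [pvSegs]
  | cons c cs =>
    simp only [pvSegs]
    split_ifs
    · simp
    · cases h : pvSegs cs with
      | nil => exact absurd h (pvSegs_ne_nil cs)
      | cons a t => simp [List.modifyHead]

theorem pv_modifyHead_nil_append (l : List (List Char)) :
    l.modifyHead ([] ++ ·) = l := by
  cases l <;> simp [List.modifyHead]

theorem pv_go_spec : ∀ (fuel : Nat) (l cur : List Char) (acc : List (List Char)),
    l.length ≤ fuel →
    PySem.Chars.splitOn.go ['/'] fuel l cur acc
      = acc.reverse ++ (pvSegs l).modifyHead (cur.reverse ++ ·) := by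
  intro fuel
  induction fuel with
  | zero =>
    intro l cur acc h
    have : l = [] := List.eq_nil_of_length_eq_zero (Nat.le_zero.mp h)
    subst this
    simp [PySem.Chars.splitOn.go, pvSegs, List.modifyHead]
  | succ n ih =>
    intro l cur acc h
    cases l with
    | nil => simp [PySem.Chars.splitOn.go, pvSegs, List.modifyHead]
    | cons c rest =>
      by_cases hc : c = '/'
      · subst hc
        rw [show PySem.Chars.splitOn.go ['/'] (n+1) ('/' :: rest) cur acc
              = PySem.Chars.splitOn.go ['/'] n rest [] (cur.reverse :: acc) by
            simp [PySem.Chars.splitOn.go, List.isPrefixOf]]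
        rw [ih rest [] (cur.reverse :: acc) (by simpa using Nat.succ_le_succ_iff.mp h)]
        rw [show pvSegs ('/' :: rest) = [] :: pvSegs rest from by simp [pvSegs]]
        cases pvSegs rest <;> simp [List.modifyHead]
      · rw [show PySem.Chars.splitOn.go ['/'] (n+1) (c :: rest) cur acc
              = PySem.Chars.splitOn.go ['/'] n rest (c :: cur) acc by
            simp [PySem.Chars.splitOn.go, List.isPrefixOf, Ne.symm hc]]
        rw [ih rest (c :: cur) acc (by simpa using Nat.succ_le_succ_iff.mp h)]
        have hmod : (pvSegs rest).modifyHead ((c :: cur).reverse ++ ·)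
            = (pvSegs (c :: rest)).modifyHead (cur.reverse ++ ·) := by
          rw [show pvSegs (c :: rest) = (pvSegs rest).modifyHead (c :: ·) from by
              simp [pvSegs, hc]]
          cases hseg : pvSegs rest with
          | nil => exact absurd hseg (pvSegs_ne_nil rest)
          | cons a t => simp [List.modifyHead]
        rw [hmod]

theorem pv_splitOn_eq (cs : List Char) :
    PySem.Chars.splitOn cs ['/'] = pvSegs cs := by
  show PySem.Chars.splitOn.go ['/'] (cs.length + 1) cs [] [] = pvSegs cs
  rw [pv_go_spec (cs.length + 1) cs [] [] (Nat.le_succ _)]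
  simpa using pv_modifyHead_nil_append (pvSegs cs)

-- single-character find characterised through takeWhile
theorem pv_find_go : ∀ (seg : List Char) (k : Nat),
    PySem.Chars.find.go ['['] seg k
      = if '[' ∈ seg
        then ((k : Int) + ((seg.takeWhile (fun x => !decide (x = '['))).length : Int))
        else -1 := by
  intro seg
  induction seg with
  | nil => intro k; simp [PySem.Chars.find.go]
  | cons c rest ih =>
    intro k
    by_cases hc : c = '['
    · subst hc
      simp [PySem.Chars.find.go, List.isPrefixOf]
    · rw [show PySem.Chars.find.go ['['] (c :: rest) k
            = PySem.Chars.find.go ['['] rest (k+1) by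
          simp [PySem.Chars.find.go, List.isPrefixOf, Ne.symm hc]]
      rw [ih (k+1)]
      rw [List.takeWhile_cons_of_pos (by simp [hc])]
      by_cases h : '[' ∈ rest
      · rw [if_pos h, if_pos (List.mem_cons_of_mem c h), List.length_cons]
        push_cast; ring
      · rw [if_neg h, if_neg (by simp [h, Ne.symm hc])]

-- A's per-segment truncation + strip equals pvClean
theorem pv_cleanA (seg : List Char) :
    PySem.Chars.strip
      (if PySem.Chars.find seg ['['] ≥ 0
       then PySem.Chars.slice seg none (some (PySem.Chars.find seg ['[']))
       else seg) = pvClean seg := by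
  have hfind : PySem.Chars.find seg ['['] =
      if '[' ∈ seg
      then (((seg.takeWhile (fun x => !decide (x = '['))).length : Int))
      else -1 := by
    show PySem.Chars.find.go ['['] seg 0 = _
    rw [pv_find_go seg 0]
    split_ifs <;> simp
  by_cases h : '[' ∈ seg
  · rw [hfind, if_pos h, if_pos (by omega), PySem.Chars.slice_eq_listSlice,
        PySem.List.slice_to seg (by omega), Int.toNat_natCast,
        ← List.prefix_iff_eq_take.mp (List.takeWhile_prefix _)]
    rfl
  · rw [hfind, if_neg h, if_neg (by norm_num)]
    unfold pvClean
    rw [List.takeWhile_eq_self_iff.mpr (fun c hc => by simp; rintro rfl; exact h hc)]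

-- A's foldl as map-of-filter
theorem pv_A_eq (xpath : String) :
    split_xpath xpath = (pvOut (pvSegs xpath.toList)).map String.ofList := by
  unfold split_xpath
  have hbody : (fun (acc : List (List Char)) (tag : List Char) =>
      let tag := if PySem.Chars.find tag ['['] ≥ 0
                 then PySem.Chars.slice tag none (some (PySem.Chars.find tag ['[']))
                 else tag
      if !(PySem.Chars.strip tag).isEmpty then acc ++ [PySem.Chars.strip tag] else acc)
      = fun acc tag => if (fun s => !(pvClean s).isEmpty) tag = true
                       then acc ++ [pvClean tag] else acc := by
    funext acc tag
    simp only []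
    rw [pv_cleanA tag]
  rw [pv_splitOn_eq, hbody,
      PySem.List.foldl_append_if (fun s => !(pvClean s).isEmpty) pvClean (pvSegs xpath.toList) []]
  simp [pvOut]

-- B's foldl emits tags ++ pvE cur sk cs
theorem pv_B_spec : ∀ (cs : List Char) (tags : List (List Char)) (cur : List Char) (sk : Bool),
    (List.foldl pvStep (tags, cur, sk) cs).1
      ++ pvFlush (List.foldl pvStep (tags, cur, sk) cs).2.1
      = tags ++ pvE cur sk cs := by
  intro cs
  induction cs with
  | nil => intro tags cur sk; simp [pvE]
  | cons c rest ih =>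
    intro tags cur sk
    by_cases hc : c = '/'
    · subst hc
      rw [show List.foldl pvStep (tags, cur, sk) ('/' :: rest)
            = List.foldl pvStep (tags ++ pvFlush cur, [], false) rest by
          simp [List.foldl_cons, pvStep]]
      rw [ih]; simp [pvE]
    · by_cases hsk : sk = true
      · subst hsk
        rw [show List.foldl pvStep (tags, cur, true) (c :: rest)
              = List.foldl pvStep (tags, cur, true) rest by
            simp [List.foldl_cons, pvStep, hc]]
        rw [ih]; simp [pvE, hc]
      · replace hsk : sk = false := by simpa using hsk
        subst hsk
        by_cases hb : c = '['
        · subst hb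
          rw [show List.foldl pvStep (tags, cur, false) ('[' :: rest)
                = List.foldl pvStep (tags, cur, true) rest by
              simp [List.foldl_cons, pvStep]]
          rw [ih]; simp [pvE]
        · rw [show List.foldl pvStep (tags, cur, false) (c :: rest)
                = List.foldl pvStep (tags, cur ++ [c], false) rest by
              simp [List.foldl_cons, pvStep, hc, hb]]
          rw [ih]; simp [pvE, hc, hb]

-- emitting one cleaned head segment
theorem pv_out_cons (h : List Char) (t : List (List Char)) :
    pvOut (h :: t) = (if (pvClean h).isEmpty then [] else [pvClean h]) ++ pvOut t := by
  by_cases he : (pvClean h).isEmpty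
  · simp [pvOut, List.filter, he]
  · simp [pvOut, List.filter, he]

theorem pv_flush_eq_emit (cur : List Char) (h : '[' ∉ cur) :
    pvFlush cur = (if (pvClean cur).isEmpty then [] else [pvClean cur]) := by
  have ht : cur.takeWhile (fun x => !decide (x = '[')) = cur :=
    List.takeWhile_eq_self_iff.mpr (fun c hc => by simp; rintro rfl; exact h hc)
  unfold pvFlush pvClean
  rw [ht]

-- the main correspondence, both skipping states at once
theorem pv_main : ∀ (cs : List Char),
    (∀ cur : List Char, '[' ∉ cur →
        pvE cur false cs = pvOut ((pvSegs cs).modifyHead (cur ++ ·)))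
    ∧ (∀ cur : List Char,
        pvE cur true cs = pvFlush cur ++ pvOut (pvSegs cs).tail) := by
  intro cs
  induction cs with
  | nil =>
    constructor
    · intro cur hcur
      rw [show pvE cur false [] = pvFlush cur from rfl, pv_flush_eq_emit cur hcur]
      rw [show (pvSegs []).modifyHead (cur ++ ·) = [cur ++ []] from rfl, pv_out_cons]
      simp [pvOut]
    · intro cur
      rw [show pvE cur true [] = pvFlush cur from rfl, show pvSegs [] = [[]] from rfl]
      simp [pvOut]
  | cons c rest ih =>
    obtain ⟨ihF, ihT⟩ := ih
    constructor
    · intro cur hcur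
      by_cases hc : c = '/'
      · subst hc
        rw [show pvE cur false ('/' :: rest) = pvFlush cur ++ pvE [] false rest by simp [pvE]]
        rw [ihF [] (by simp), pv_modifyHead_nil_append,
            show pvSegs ('/' :: rest) = [] :: pvSegs rest from by simp [pvSegs],
            show ([] :: pvSegs rest).modifyHead (cur ++ ·) = (cur ++ []) :: pvSegs rest from by
              simp [List.modifyHead],
            pv_out_cons, pv_flush_eq_emit cur hcur]
        simp
      · by_cases hb : c = '['
        · subst hb
          rw [show pvE cur false ('[' :: rest) = pvE cur true rest by simp [pvE]]
          rw [ihT cur,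
              show pvSegs ('[' :: rest) = (pvSegs rest).modifyHead ('[' :: ·) from by
                simp [pvSegs]]
          cases h : pvSegs rest with
          | nil => exact absurd h (pvSegs_ne_nil rest)
          | cons a t =>
            rw [show ((a :: t).modifyHead ('[' :: ·)).modifyHead (cur ++ ·)
                  = (cur ++ '[' :: a) :: t from by simp [List.modifyHead]]
            rw [pv_out_cons]
            have hclean : pvClean (cur ++ '[' :: a) = pvClean cur := by
              unfold pvClean
              congr 1
              rw [List.takeWhile_append]
              rw [List.takeWhile_eq_self_iff.mpr
                    (fun x hx => by simp; rintro rfl; exact hcur hx)]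
              simp
            rw [hclean, pv_flush_eq_emit cur hcur]
            simp
        · rw [show pvE cur false (c :: rest) = pvE (cur ++ [c]) false rest by
              simp [pvE, hc, hb]]
          rw [ihF (cur ++ [c]) (by simp [hcur]; exact fun h => hb h.symm)]
          rw [show pvSegs (c :: rest) = (pvSegs rest).modifyHead (c :: ·) from by
              simp [pvSegs, hc]]
          cases h : pvSegs rest with
          | nil => exact absurd h (pvSegs_ne_nil rest)
          | cons a t => simp [List.modifyHead]
    · intro cur
      by_cases hc : c = '/'
      · subst hc
        rw [show pvE cur true ('/' :: rest) = pvFlush cur ++ pvE [] false rest by simp [pvE]]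
        rw [ihF [] (by simp), pv_modifyHead_nil_append,
            show pvSegs ('/' :: rest) = [] :: pvSegs rest from by simp [pvSegs]]
        simp
      · rw [show pvE cur true (c :: rest) = pvE cur true rest by simp [pvE, hc]]
        rw [ihT cur,
            show pvSegs (c :: rest) = (pvSegs rest).modifyHead (c :: ·) from by
              simp [pvSegs, hc]]
        cases h : pvSegs rest with
        | nil => exact absurd h (pvSegs_ne_nil rest)
        | cons a t => simp [List.modifyHead]

-- ===== VERDICT (by name: the statement is the Claim_ definition above) =====
theorem split_xpath_spec : Claim_equal_split_xpath := by
  intro xpath _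
  unfold Spec_split_xpath
  rw [pv_A_eq xpath]
  show List.map String.ofList (pvOut (pvSegs xpath.toList))
      = ((List.foldl pvStep ([], [], false) xpath.toList).1
          ++ pvFlush (List.foldl pvStep ([], [], false) xpath.toList).2.1).map String.ofList
  rw [pv_B_spec xpath.toList [] [] false]
  rw [(pv_main xpath.toList).1 [] (by simp), pv_modifyHead_nil_append]
  simp
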